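-- pv_equiv track=rewrite | github.com/ChaoticCross12/ICSE2026-vafuzz | VAFuzz/py-src/generator_helpers.py | keep_last_entries_by_id
-- ===== SOURCE A (Python) =====
-- def keep_last_entries_by_id(arrays):
--     filtered_arrays = []
--
--     for array in arrays:
--         # Dictionary to store the last occurrence of each ID
--         last_entries = {}
--
--         # Iterate through the array to find last occurrences
--         for item in array:
--             last_entries[item[0]] = item
--
--         # Convert the last entries dictionary back to a list, sorted by ID
--         filtered_array = list(last_entries.values())
--
--         # Optional: Sort the filtered array by the first element (ID)
--         filtered_array.sort(key=lambda x: x[0])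
--
--         filtered_arrays.append(filtered_array)
--
--     return filtered_arrays
-- ===== SOURCE B (Python) =====
-- def keep_last_entries_by_id(arrays):
--     result = []
--     for array in arrays:
--         # Stable sort by ID: within equal IDs, original order is preserved,
--         # so the last element of each equal-ID run is that ID's last occurrence.
--         s = sorted(array, key=lambda item: item[0])
--         kept = []
--         run_last = None
--         for item in s:
--             if run_last is not None and run_last[0] != item[0]:
--                 kept.append(run_last)
--             run_last = item
--         if run_last is not None:
--             kept.append(run_last)
--         result.append(kept)
--     return result
-- ===== Notes on version B (the rewrite author's own statement) =====
-- stated objective: alternative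
-- what changed: Replaced the last-occurrence dictionary plus sort of its values by a stable sort of the array followed by one linear pass that keeps the last item of each run of equal IDs.
import Mathlib
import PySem

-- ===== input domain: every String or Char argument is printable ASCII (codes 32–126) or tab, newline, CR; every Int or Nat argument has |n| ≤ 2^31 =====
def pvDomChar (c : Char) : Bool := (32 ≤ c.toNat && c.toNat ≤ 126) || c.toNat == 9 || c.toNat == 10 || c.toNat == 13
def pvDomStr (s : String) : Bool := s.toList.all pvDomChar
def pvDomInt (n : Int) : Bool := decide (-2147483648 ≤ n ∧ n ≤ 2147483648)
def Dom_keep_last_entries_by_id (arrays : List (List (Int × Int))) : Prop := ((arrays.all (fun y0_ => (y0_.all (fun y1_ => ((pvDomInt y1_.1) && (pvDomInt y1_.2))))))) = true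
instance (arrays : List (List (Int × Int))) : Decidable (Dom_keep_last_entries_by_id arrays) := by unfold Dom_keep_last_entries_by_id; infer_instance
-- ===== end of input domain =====

-- ===== PORT A =====
-- B replaces A's per-array last-occurrence dict + sort of its values by a stable
-- sort of the array followed by one linear pass keeping the last of each equal-ID run.
def keep_last_entries_by_id (arrays : List (List (Int × Int))) : List (List (Int × Int)) :=
  arrays.foldl (fun filtered_arrays array =>
    let last_entries := array.foldl (fun d item => d.insert item.1 item)
      (PySem.Dict.empty : PySem.Dict Int (Int × Int))
    let filtered_array := PySem.List.sorted last_entries.values (fun x => x.1) false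
    filtered_arrays ++ [filtered_array]) []

-- ===== PORT B =====
-- one step of B's linear pass: emit the previous item when a new ID starts
def pvRunStep (st : List (Int × Int) × Option (Int × Int)) (item : Int × Int) :
    List (Int × Int) × Option (Int × Int) :=
  match st.2 with
  | none => (st.1, some item)
  | some run_last =>
      if run_last.1 ≠ item.1 then (st.1 ++ [run_last], some item) else (st.1, some item)

def pvKeepLastSorted (array : List (Int × Int)) : List (Int × Int) :=
  let s := PySem.List.sorted array (fun item => item.1) false
  let st := s.foldl pvRunStep ([], none)
  match st.2 with
  | none => st.1
  | some run_last => st.1 ++ [run_last]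

def keep_last_entries_by_id_alt (arrays : List (List (Int × Int))) : List (List (Int × Int)) :=
  arrays.foldl (fun result array => result ++ [pvKeepLastSorted array]) []

-- ===== PRECONDITION & SPEC =====
def Spec_keep_last_entries_by_id (arrays : List (List (Int × Int))) (out : List (List (Int × Int))) : Prop := out = keep_last_entries_by_id_alt arrays
instance (arrays : List (List (Int × Int))) (out : List (List (Int × Int))) : Decidable (Spec_keep_last_entries_by_id arrays out) := by unfold Spec_keep_last_entries_by_id; infer_instance

-- ===== CLAIM (what is proved, stated in full; the proofs are below) =====
def Claim_equal_keep_last_entries_by_id : Prop := ∀ (arrays : List (List (Int × Int))), Dom_keep_last_entries_by_id arrays → Spec_keep_last_entries_by_id arrays (keep_last_entries_by_id arrays)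

-- ===== LEMMAS AND PROOFS =====

-- B's pass, as a lookahead recursion (proof-side reformulation of the fold)
def pvLastRun : List (Int × Int) → List (Int × Int)
  | [] => []
  | [x] => [x]
  | x :: y :: t => if x.1 = y.1 then pvLastRun (y :: t) else x :: pvLastRun (y :: t)

-- last occurrence of key k in l
def pvLastOcc (l : List (Int × Int)) (k : Int) : Option (Int × Int) :=
  ((l.filter (fun q => q.1 == k)).reverse).head?

lemma pvRunStep_eq_lastRun (s : List (Int × Int)) : ∀ (x : Int × Int) (kept : List (Int × Int)),
    (match (s.foldl pvRunStep (kept, some x)).2 with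
     | none => (s.foldl pvRunStep (kept, some x)).1
     | some rl => (s.foldl pvRunStep (kept, some x)).1 ++ [rl]) = kept ++ pvLastRun (x :: s) := by
  induction s with
  | nil => intro x kept; simp [pvLastRun]
  | cons y t ih =>
      intro x kept
      by_cases h : x.1 = y.1
      · simp [List.foldl, pvRunStep, h, ih, pvLastRun]
      · simp [List.foldl, pvRunStep, h, ih, pvLastRun, List.append_assoc]

lemma pvKeepLastSorted_eq (array : List (Int × Int)) :
    pvKeepLastSorted array = pvLastRun (PySem.List.sorted array (fun item => item.1) false) := by
  unfold pvKeepLastSorted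
  cases hs : PySem.List.sorted array (fun item => item.1) false with
  | nil => simp [pvLastRun]
  | cons x t => simpa using pvRunStep_eq_lastRun t x []

lemma pv_filter_insertBy (x : Int × Int) (m : List (Int × Int))
    (hp : m.Pairwise (fun a b => a.1 ≤ b.1)) (k : Int) :
    (PySem.List.insertBy (fun a b => decide (a.1 < b.1)) x m).filter (fun q => q.1 == k) =
      m.filter (fun q => q.1 == k) ++ (if x.1 = k then [x] else []) := by
  induction m with
  | nil => simp [PySem.List.insertBy]; split <;> simp_all
  | cons y ys ih =>
      rw [List.pairwise_cons] at hp
      obtain ⟨hy, hp'⟩ := hp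
      by_cases hlt : x.1 < y.1
      · have hins : PySem.List.insertBy (fun a b => decide (a.1 < b.1)) x (y :: ys) = x :: y :: ys := by
          simp [PySem.List.insertBy, hlt]
        rw [hins]
        by_cases hk : x.1 = k
        · have hnil : (y :: ys).filter (fun q => q.1 == k) = [] := by
            rw [List.filter_eq_nil_iff]
            intro z hz
            have hyz : y.1 ≤ z.1 := by
              rcases List.mem_cons.mp hz with rfl | hz'
              · exact le_refl _
              · exact hy z hz'
            have hxz : x.1 < z.1 := lt_of_lt_of_le hlt hyz
            simp only [beq_iff_eq]
            omega
          simp [hk, hnil]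
        · simp [List.filter_cons, hk]
      · have hins : PySem.List.insertBy (fun a b => decide (a.1 < b.1)) x (y :: ys) =
            y :: PySem.List.insertBy (fun a b => decide (a.1 < b.1)) x ys := by
          simp [PySem.List.insertBy, hlt]
        rw [hins, List.filter_cons, List.filter_cons, ih hp']
        by_cases hyk : y.1 = k <;> simp [hyk]

-- stability of Python's sort, as a filter identity
lemma pv_sorted_filter (l : List (Int × Int)) (k : Int) :
    (PySem.List.sorted l (fun item => item.1) false).filter (fun q => q.1 == k) =
      l.filter (fun q => q.1 == k) := by
  induction l using List.reverseRecOn with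
  | nil => simp [PySem.List.sorted_eq_foldl_insertBy]
  | append_singleton t x ih =>
      have h1 : PySem.List.sorted (t ++ [x]) (fun item => item.1) false =
          PySem.List.insertBy (fun a b => decide (a.1 < b.1)) x
            (PySem.List.sorted t (fun item => item.1) false) := by
        rw [PySem.List.sorted_eq_foldl_insertBy, PySem.List.sorted_eq_foldl_insertBy]
        simp [List.foldl_append]
      have hp : (PySem.List.sorted t (fun item => item.1) false).Pairwise
          (fun a b => a.1 ≤ b.1) := PySem.List.sorted_pairwise t (fun item => item.1)
      rw [h1, pv_filter_insertBy x _ hp k, ih, List.filter_append]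
      by_cases hk : x.1 = k <;> simp [hk]

lemma pvLastOcc_cons (q : Int × Int) (t : List (Int × Int)) (k : Int) :
    pvLastOcc (q :: t) k = (pvLastOcc t k).or (if q.1 == k then some q else none) := by
  unfold pvLastOcc
  by_cases hq : q.1 = k
  · rw [List.filter_cons_of_pos (by simp [hq]), List.reverse_cons]
    cases hrev : (List.filter (fun q => q.1 == k) t).reverse with
    | nil => simp [hq]
    | cons a b => simp [hq]
  · rw [List.filter_cons_of_neg (by simp [hq])]
    simp [hq]

lemma pv_get?_foldl_insert (l : List (Int × Int)) : ∀ (d : PySem.Dict Int (Int × Int)) (k : Int),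
    (l.foldl (fun d item => d.insert item.1 item) d).get? k = (pvLastOcc l k).or (d.get? k) := by
  induction l with
  | nil => intro d k; simp [pvLastOcc]
  | cons q t ih =>
      intro d k
      rw [List.foldl_cons, ih, pvLastOcc_cons, Option.or_assoc]
      congr 1
      rw [PySem.Dict.get?_insert]
      by_cases hk : k = q.1
      · simp [hk]
      · have h2 : ¬ q.1 = k := fun h => hk h.symm
        simp [hk, h2]

lemma pv_keyInv (l : List (Int × Int)) : ∀ (d : PySem.Dict Int (Int × Int)),
    (∀ kv ∈ d.items, kv.2.1 = kv.1) →
    ∀ kv ∈ (l.foldl (fun d item => d.insert item.1 item) d).items, kv.2.1 = kv.1 := by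
  induction l with
  | nil => intro d h; exact h
  | cons q t ih =>
      intro d h
      rw [List.foldl_cons]
      refine ih _ ?_
      intro kv hkv
      rcases (PySem.Dict.mem_items_insert _ _ _ _).mp hkv with rfl | ⟨hmem, _⟩
      · rfl
      · exact h kv hmem

lemma pv_mem_values_iff (l : List (Int × Int)) (p : Int × Int) :
    p ∈ (l.foldl (fun d item => d.insert item.1 item)
          (PySem.Dict.empty : PySem.Dict Int (Int × Int))).values ↔ pvLastOcc l p.1 = some p := by
  have hget : (l.foldl (fun d item => d.insert item.1 item)
      (PySem.Dict.empty : PySem.Dict Int (Int × Int))).get? p.1 = pvLastOcc l p.1 := by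
    rw [pv_get?_foldl_insert]
    simp
  have hnd : (l.foldl (fun d item => d.insert item.1 item)
      (PySem.Dict.empty : PySem.Dict Int (Int × Int))).keys.Nodup :=
    PySem.Dict.nodup_keys_foldl_insert_key l Prod.fst (fun _ x => x) PySem.Dict.empty
      (by simp [PySem.Dict.keys_empty])
  rw [← hget]
  constructor
  · intro hmem
    simp only [PySem.Dict.values, List.mem_map] at hmem
    obtain ⟨kv, hkv, hkv2⟩ := hmem
    have hinv := pv_keyInv l PySem.Dict.empty (by intro kv h; simp [PySem.Dict.empty] at h) kv hkv
    have : (p.1, p) ∈ (l.foldl (fun d item => d.insert item.1 item)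
        (PySem.Dict.empty : PySem.Dict Int (Int × Int))).items := by
      have : kv = (p.1, p) := by
        obtain ⟨k1, v1⟩ := kv
        simp only at hkv2 hinv
        subst hkv2; rw [← hinv]
      rwa [this] at hkv
    exact PySem.Dict.get?_of_mem_items _ this hnd
  · intro hget2
    have := PySem.Dict.mem_items_of_get?_eq_some _ hget2
    simp only [PySem.Dict.values, List.mem_map]
    exact ⟨(p.1, p), this, rfl⟩

lemma pvLastOcc_eq_none (l : List (Int × Int)) (k : Int) (h : ∀ q ∈ l, ¬ q.1 = k) :
    pvLastOcc l k = none := by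
  unfold pvLastOcc
  rw [List.filter_eq_nil_iff.mpr (by intro q hq; simpa using h q hq)]
  rfl

lemma pvLastOcc_ne_none (l : List (Int × Int)) (k : Int) {q : Int × Int}
    (hq : q ∈ l) (hqk : q.1 = k) : pvLastOcc l k ≠ none := by
  unfold pvLastOcc
  intro hcon
  rw [List.head?_eq_none_iff, List.reverse_eq_nil_iff, List.filter_eq_nil_iff] at hcon
  exact hcon q hq (by simp [hqk])

lemma pv_mem_lastRun_sub {s : List (Int × Int)} {z : Int × Int} (h : z ∈ pvLastRun s) : z ∈ s := by
  revert h
  induction s using pvLastRun.induct with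
  | case1 => intro h; simp [pvLastRun] at h
  | case2 x => intro h; simpa [pvLastRun] using h
  | case3 x y t hxy ih =>
      intro h
      rw [pvLastRun, if_pos hxy] at h
      exact List.mem_cons_of_mem _ (ih h)
  | case4 x y t hxy ih =>
      intro h
      rw [pvLastRun, if_neg hxy] at h
      rcases List.mem_cons.mp h with rfl | h'
      · exact List.mem_cons_self
      · exact List.mem_cons_of_mem _ (ih h')

lemma pv_pairwise_lt_lastRun (s : List (Int × Int)) (hp : s.Pairwise (fun a b => a.1 ≤ b.1)) :
    (pvLastRun s).Pairwise (fun a b => a.1 < b.1) := by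
  revert hp
  induction s using pvLastRun.induct with
  | case1 => intro _; simp [pvLastRun]
  | case2 x => intro _; simp [pvLastRun]
  | case3 x y t hxy ih =>
      intro hp
      rw [pvLastRun, if_pos hxy]
      exact ih (List.pairwise_cons.mp hp).2
  | case4 x y t hxy ih =>
      intro hp
      rw [pvLastRun, if_neg hxy]
      obtain ⟨hx, hp'⟩ := List.pairwise_cons.mp hp
      refine List.pairwise_cons.mpr ⟨?_, ih hp'⟩
      intro z hz
      have hzmem : z ∈ y :: t := pv_mem_lastRun_sub hz
      have hxy' : x.1 < y.1 := lt_of_le_of_ne (hx y List.mem_cons_self) hxy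
      rcases List.mem_cons.mp hzmem with rfl | hz'
      · exact hxy'
      · exact lt_of_lt_of_le hxy' ((List.pairwise_cons.mp hp').1 z hz')

lemma pv_mem_lastRun_iff (s : List (Int × Int)) (hp : s.Pairwise (fun a b => a.1 ≤ b.1))
    (p : Int × Int) : p ∈ pvLastRun s ↔ pvLastOcc s p.1 = some p := by
  revert hp
  induction s using pvLastRun.induct with
  | case1 => intro _; simp [pvLastRun, pvLastOcc]
  | case2 x =>
      intro _
      rw [pvLastRun, pvLastOcc_cons, pvLastOcc_eq_none [] p.1 (by simp), Option.none_or]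
      by_cases hx : x.1 = p.1
      · rw [if_pos (by simp [hx])]
        simp [eq_comm]
      · rw [if_neg (by simp [hx])]
        constructor
        · intro hm
          exact absurd (congrArg Prod.fst (List.mem_singleton.mp hm)) (fun h => hx h.symm)
        · intro h; simp at h
  | case3 x y t hxy ih =>
      intro hp
      obtain ⟨hx, hp'⟩ := List.pairwise_cons.mp hp
      rw [pvLastRun, if_pos hxy, pvLastOcc_cons]
      cases h0 : pvLastOcc (y :: t) p.1 with
      | some q => rw [Option.some_or, ← h0]; exact ih hp'
      | none =>
          by_cases hxp : x.1 = p.1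
          · exact absurd h0 (pvLastOcc_ne_none (y :: t) p.1 List.mem_cons_self (by omega))
          · rw [Option.none_or, if_neg (by simp [hxp]), ih hp', h0]

  | case4 x y t hxy ih =>
      intro hp
      obtain ⟨hx, hp'⟩ := List.pairwise_cons.mp hp
      have hxy' : x.1 < y.1 := lt_of_le_of_ne (hx y List.mem_cons_self) hxy
      rw [pvLastRun, if_neg hxy, pvLastOcc_cons]
      by_cases hxp : x.1 = p.1
      · have h0 : pvLastOcc (y :: t) p.1 = none := by
          refine pvLastOcc_eq_none _ _ ?_
          intro q hq
          have : y.1 ≤ q.1 := by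
            rcases List.mem_cons.mp hq with rfl | hq'
            · exact le_refl _
            · exact (List.pairwise_cons.mp hp').1 q hq'
          omega
        rw [h0, Option.none_or, if_pos (by simp [hxp])]
        constructor
        · intro hmem
          rcases List.mem_cons.mp hmem with rfl | h'
          · rfl
          · have hmem2 := pv_mem_lastRun_sub h'
            have : y.1 ≤ p.1 := by
              rcases List.mem_cons.mp hmem2 with rfl | h''
              · exact le_refl _
              · exact (List.pairwise_cons.mp hp').1 p h''
            omega
        · intro hsome
          exact List.mem_cons.mpr (Or.inl (Option.some.inj hsome).symm)
      · rw [if_neg (by simp [hxp])]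
        cases h0 : pvLastOcc (y :: t) p.1 with
        | some q =>
            rw [Option.some_or, ← h0, ← ih hp']
            constructor
            · intro hmem
              rcases List.mem_cons.mp hmem with rfl | h'
              · exact absurd rfl hxp
              · exact h'
            · exact fun h' => List.mem_cons_of_mem _ h'
        | none =>
            rw [Option.none_or]
            constructor
            · intro hmem
              rcases List.mem_cons.mp hmem with rfl | h'
              · exact absurd rfl hxp
              · rw [← h0, ← ih hp']; exact h'
            · intro h'; simp at h'

lemma pv_values_nodup (l : List (Int × Int)) :
    ((l.foldl (fun d item => d.insert item.1 item)
       (PySem.Dict.empty : PySem.Dict Int (Int × Int))).values).Nodup := by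
  have hnd : ((l.foldl (fun d item => d.insert item.1 item)
      (PySem.Dict.empty : PySem.Dict Int (Int × Int))).keys).Nodup :=
    PySem.Dict.nodup_keys_foldl_insert_key l Prod.fst (fun _ x => x) PySem.Dict.empty
      (by simp [PySem.Dict.keys_empty])
  have hinv := pv_keyInv l PySem.Dict.empty (by intro kv h; simp [PySem.Dict.empty] at h)
  simp only [PySem.Dict.keys] at hnd
  have h1 : ((l.foldl (fun d item => d.insert item.1 item)
        (PySem.Dict.empty : PySem.Dict Int (Int × Int))).items).map (fun kv => kv.1) =
      (((l.foldl (fun d item => d.insert item.1 item)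
        (PySem.Dict.empty : PySem.Dict Int (Int × Int))).items).map (fun kv => kv.2)).map
        (fun v => v.1) := by
    rw [List.map_map]
    exact List.map_congr_left (fun kv hkv => (hinv kv hkv).symm)
  rw [h1] at hnd
  simp only [PySem.Dict.values]
  exact hnd.of_map

lemma pv_per_array (array : List (Int × Int)) :
    PySem.List.sorted
        ((array.foldl (fun d item => d.insert item.1 item)
          (PySem.Dict.empty : PySem.Dict Int (Int × Int))).values) (fun x => x.1) false =
      pvKeepLastSorted array := by
  rw [pvKeepLastSorted_eq]
  have hp : (PySem.List.sorted array (fun item => item.1) false).Pairwise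
      (fun a b => a.1 ≤ b.1) := PySem.List.sorted_pairwise array (fun item => item.1)
  have h1 := pv_pairwise_lt_lastRun _ hp
  have ndys : (pvLastRun (PySem.List.sorted array (fun item => item.1) false)).Nodup :=
    h1.imp (fun h => ne_of_apply_ne Prod.fst (ne_of_lt h))
  have hmem : ∀ p, p ∈ pvLastRun (PySem.List.sorted array (fun item => item.1) false) ↔
      p ∈ (array.foldl (fun d item => d.insert item.1 item)
        (PySem.Dict.empty : PySem.Dict Int (Int × Int))).values := by
    intro p
    rw [pv_mem_lastRun_iff _ hp p, pv_mem_values_iff]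
    unfold pvLastOcc
    rw [pv_sorted_filter]
  have perm := (List.perm_ext_iff_of_nodup ndys (pv_values_nodup array)).mpr hmem
  exact PySem.List.sorted_eq_of_perm_of_pairwise_lt _ _ (fun x => x.1) perm h1

lemma pv_foldl_append {α β : Type} (l : List α) (f : α → β) : ∀ (acc : List β),
    l.foldl (fun acc x => acc ++ [f x]) acc = acc ++ l.map f := by
  induction l with
  | nil => simp
  | cons x t ih => intro acc; simp [List.foldl, ih, List.append_assoc]

-- ===== VERDICT (by name: the statement is the Claim_ definition above) =====
theorem keep_last_entries_by_id_spec : Claim_equal_keep_last_entries_by_id := by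
  intro arrays _
  unfold Spec_keep_last_entries_by_id keep_last_entries_by_id keep_last_entries_by_id_alt
  rw [pv_foldl_append, pv_foldl_append]
  simp only [List.nil_append]
  exact List.map_congr_left (fun array _ => pv_per_array array)
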